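-- pv_equiv track=rewrite | github.com/emreds/tum-dlr-automl-for-eo | src/tum_dlr_automl_for_eo/utils/helper_functions.py | rename_ops
-- ===== SOURCE A (Python) =====
-- CONV3X3 = 'conv3x3-bn-relu'
--
-- CONV1X1 = 'conv1x1-bn-relu'
--
-- MAXPOOL3X3 = 'maxpool3x3'
--
-- def rename_ops(ops):
--     c1x1 = 0
--     c3x3 = 0
--     mp3x3 = 0
--     new_ops = []
--     for op in ops:
--         if op == CONV1X1:
--             new_ops = new_ops + [op + "_" + str(c1x1)]
--             c1x1 = c1x1 + 1
--         elif op == CONV3X3: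
--             new_ops = new_ops + [op + "_" + str(c3x3)]
--             c3x3 = c3x3 + 1
--         elif op == MAXPOOL3X3:
--             new_ops = new_ops + [op + "_" + str(mp3x3)]
--             mp3x3 = mp3x3 + 1
--         else:
--             new_ops = new_ops + [op]
--     return new_ops
-- ===== SOURCE B (Python) =====
-- CONV3X3 = 'conv3x3-bn-relu'
--
-- CONV1X1 = 'conv1x1-bn-relu'
--
-- MAXPOOL3X3 = 'maxpool3x3'
--
-- def rename_ops(ops):
--     special = {CONV1X1, CONV3X3, MAXPOOL3X3}
--     return [op + "_" + str(ops[:i].count(op)) if op in special else op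
--             for i, op in enumerate(ops)]
-- ===== Notes on version B (the rewrite author's own statement) =====
-- stated objective: simpler
-- what changed: Replaces A's stateful loop with three running counters and a list rebuilt by + each iteration with a stateless comprehension: each output element is computed independently, the counter being the count of that op's earlier occurrences in the prefix ops[:i].
import Mathlib
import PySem

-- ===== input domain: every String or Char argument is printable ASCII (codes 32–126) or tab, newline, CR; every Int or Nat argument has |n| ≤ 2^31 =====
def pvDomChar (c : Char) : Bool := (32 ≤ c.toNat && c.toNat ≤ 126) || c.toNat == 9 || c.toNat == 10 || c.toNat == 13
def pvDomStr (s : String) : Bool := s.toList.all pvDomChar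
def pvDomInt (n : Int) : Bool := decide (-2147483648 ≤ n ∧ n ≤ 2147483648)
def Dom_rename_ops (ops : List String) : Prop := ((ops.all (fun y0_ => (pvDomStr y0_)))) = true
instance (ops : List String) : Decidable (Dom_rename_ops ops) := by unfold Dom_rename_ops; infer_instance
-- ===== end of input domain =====

-- B replaces A's stateful loop (three running counters + accumulator list) by a stateless
-- comprehension: each element's counter is the count of its earlier occurrences in ops[:i].

def pvCONV3X3 : String := "conv3x3-bn-relu"
def pvCONV1X1 : String := "conv1x1-bn-relu"
def pvMAXPOOL3X3 : String := "maxpool3x3"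

-- ===== PORT A =====
-- A's for-loop, state = (c1x1, c3x3, mp3x3, new_ops)
def renameOpsLoopA : List String → Int → Int → Int → List String → List String
  | [], _, _, _, newOps => newOps
  | op :: rest, c1x1, c3x3, mp3x3, newOps =>
    if op = pvCONV1X1 then
      renameOpsLoopA rest (c1x1 + 1) c3x3 mp3x3 (newOps ++ [op ++ "_" ++ PySem.Int.toStr c1x1])
    else if op = pvCONV3X3 then
      renameOpsLoopA rest c1x1 (c3x3 + 1) mp3x3 (newOps ++ [op ++ "_" ++ PySem.Int.toStr c3x3])
    else if op = pvMAXPOOL3X3 then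
      renameOpsLoopA rest c1x1 c3x3 (mp3x3 + 1) (newOps ++ [op ++ "_" ++ PySem.Int.toStr mp3x3])
    else
      renameOpsLoopA rest c1x1 c3x3 mp3x3 (newOps ++ [op])

def rename_ops (ops : List String) : List String :=
  renameOpsLoopA ops 0 0 0 []

-- ===== PORT B =====
-- the python set literal {CONV1X1, CONV3X3, MAXPOOL3X3}
def pvSpecial : PySem.Set String := PySem.Set.ofList [pvCONV1X1, pvCONV3X3, pvMAXPOOL3X3]

-- the comprehension's element expression: 'op + "_" + str(ops[:i].count(op)) if op in special else op'
def renameElemB (ops : List String) (p : Int × String) : String :=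
  if pvSpecial.contains p.2 then
    p.2 ++ "_" ++ PySem.Int.toStr ((PySem.List.count (PySem.List.slice ops none (some p.1)) p.2 : Int))
  else p.2

def rename_ops_alt (ops : List String) : List String :=
  (PySem.List.enumerate ops).map (renameElemB ops)

-- ===== PRECONDITION & SPEC =====
def Spec_rename_ops (ops : List String) (out : List String) : Prop := out = rename_ops_alt ops
instance (ops : List String) (out : List String) : Decidable (Spec_rename_ops ops out) := by unfold Spec_rename_ops; infer_instance

-- ===== CLAIM (what is proved, stated in full; the proofs are below) =====
def Claim_equal_rename_ops : Prop := ∀ (ops : List String), Dom_rename_ops ops → Spec_rename_ops ops (rename_ops ops)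

-- ===== LEMMAS AND PROOFS =====

-- common recursive shape: renaming `rest` with starting counters c1/c3/m
def specRen : Int → Int → Int → List String → List String
  | _, _, _, [] => []
  | c1, c3, m, op :: t =>
    if op = pvCONV1X1 then (op ++ "_" ++ PySem.Int.toStr c1) :: specRen (c1 + 1) c3 m t
    else if op = pvCONV3X3 then (op ++ "_" ++ PySem.Int.toStr c3) :: specRen (c1) (c3 + 1) m t
    else if op = pvMAXPOOL3X3 then (op ++ "_" ++ PySem.Int.toStr m) :: specRen c1 c3 (m + 1) t
    else op :: specRen c1 c3 m t

-- A's loop accumulates exactly specRen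
theorem loopA_eq_specRen (rest : List String) :
    ∀ (c1 c3 m : Int) (newOps : List String),
      renameOpsLoopA rest c1 c3 m newOps = newOps ++ specRen c1 c3 m rest := by
  induction rest with
  | nil => intro c1 c3 m newOps; simp [renameOpsLoopA, specRen]
  | cons op t ih =>
    intro c1 c3 m newOps
    simp only [renameOpsLoopA, specRen]
    split_ifs with h1 h3 hm <;> rw [ih] <;> simp [List.append_assoc]

theorem special_contains (op : String) :
    pvSpecial.contains op = true ↔ (op = pvCONV1X1 ∨ op = pvCONV3X3 ∨ op = pvMAXPOOL3X3) := by
  rw [PySem.Set.contains_iff]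
  simp [pvSpecial, PySem.Set.mem_ofList]

theorem count_append_singleton (done : List String) (op s : String) :
    ((done ++ [op]).count s : Int) = (done.count s : Int) + (if op = s then 1 else 0) := by
  rw [List.count_append]
  by_cases h : op = s <;> simp [h]

-- B's map over the suffix, shifted past the processed prefix `done`, is specRen started
-- at the prefix counts
theorem mapB_eq_specRen (rest : List String) :
    ∀ (done : List String),
      (PySem.List.enumerate rest (done.length : Int)).map (renameElemB (done ++ rest))
        = specRen (done.count pvCONV1X1) (done.count pvCONV3X3) (done.count pvMAXPOOL3X3) rest := by
  induction rest with
  | nil => intro done; simp [PySem.List.enumerate_nil, specRen]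
  | cons op t ih =>
    intro done
    rw [PySem.List.enumerate_cons, List.map_cons, specRen]
    have hhead : renameElemB (done ++ op :: t) ((done.length : Int), op) =
        (if op = pvCONV1X1 then op ++ "_" ++ PySem.Int.toStr ((done.count pvCONV1X1 : Int))
         else if op = pvCONV3X3 then op ++ "_" ++ PySem.Int.toStr ((done.count pvCONV3X3 : Int))
         else if op = pvMAXPOOL3X3 then op ++ "_" ++ PySem.Int.toStr ((done.count pvMAXPOOL3X3 : Int))
         else op) := by
      unfold renameElemB
      by_cases h1 : op = pvCONV1X1
      · rw [if_pos ((special_contains op).mpr (Or.inl h1)), if_pos h1]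
        simp [PySem.List.count, h1]
      · by_cases h3 : op = pvCONV3X3
        · rw [if_pos ((special_contains op).mpr (Or.inr (Or.inl h3))), if_neg h1, if_pos h3]
          simp [PySem.List.count, h3]
        · by_cases hm : op = pvMAXPOOL3X3
          · rw [if_pos ((special_contains op).mpr (Or.inr (Or.inr hm))), if_neg h1, if_neg h3,
              if_pos hm]
            simp [PySem.List.count, hm]
          · rw [if_neg (fun hc => by rcases (special_contains op).mp hc with h | h | h <;> tauto),
              if_neg h1, if_neg h3, if_neg hm]
    have htail : (PySem.List.enumerate t ((done.length : Int) + 1)).map (renameElemB (done ++ op :: t))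
        = specRen ((done ++ [op]).count pvCONV1X1) ((done ++ [op]).count pvCONV3X3)
            ((done ++ [op]).count pvMAXPOOL3X3) t := by
      have := ih (done ++ [op])
      simpa [List.append_assoc] using this
    rw [hhead, htail]
    by_cases h1 : op = pvCONV1X1
    · subst h1
      rw [if_pos rfl]
      rw [count_append_singleton, count_append_singleton, count_append_singleton]
      have n3 : pvCONV1X1 ≠ pvCONV3X3 := by simp [pvCONV1X1, pvCONV3X3]
      have nm : pvCONV1X1 ≠ pvMAXPOOL3X3 := by simp [pvCONV1X1, pvMAXPOOL3X3]
      simp [n3, nm]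
    · by_cases h3 : op = pvCONV3X3
      · subst h3
        rw [if_neg h1, if_pos rfl]
        rw [count_append_singleton, count_append_singleton, count_append_singleton]
        have nm : pvCONV3X3 ≠ pvMAXPOOL3X3 := by simp [pvCONV3X3, pvMAXPOOL3X3]
        have n1 : pvCONV3X3 ≠ pvCONV1X1 := by simp [pvCONV3X3, pvCONV1X1]
        simp [n1, nm]
      · by_cases hm : op = pvMAXPOOL3X3
        · subst hm
          rw [if_neg h1, if_neg h3, if_pos rfl]
          rw [count_append_singleton, count_append_singleton, count_append_singleton]
          have n1 : pvMAXPOOL3X3 ≠ pvCONV1X1 := by simp [pvMAXPOOL3X3, pvCONV1X1]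
          have n3 : pvMAXPOOL3X3 ≠ pvCONV3X3 := by simp [pvMAXPOOL3X3, pvCONV3X3]
          simp [n1, n3]
        · rw [count_append_singleton, count_append_singleton, count_append_singleton]
          simp [h1, h3, hm]

-- ===== VERDICT (by name: the statement is the Claim_ definition above) =====
theorem rename_ops_spec : Claim_equal_rename_ops := by
  intro ops _
  unfold Spec_rename_ops rename_ops rename_ops_alt
  have hb := mapB_eq_specRen ops []
  simp only [List.length_nil, Nat.cast_zero, List.nil_append, List.count_nil, Nat.cast_zero] at hb
  rw [loopA_eq_specRen, List.nil_append, ← hb]
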